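-- pv_equiv track=rewrite | github.com/EjazAhmadvirk/Meta-Hacker-Cup-R1-2025 | snake2/meta.py | can_visit_all
-- ===== SOURCE A (Python) =====
-- def can_visit_all(heights, h):
--     """Check if all platforms can be visited with ladder height h"""
--     n = len(heights)
--     reachable = [False] * n
--
--     # Mark platforms reachable directly from ground
--     for i in range(n):
--         if heights[i] <= h:
--             reachable[i] = True
--
--     # Propagate reachability between adjacent platforms
--     changed = True
--     while changed:
--         changed = False
--         for i in range(n):
--             if reachable[i]:
--                 # Check left neighbor
--                 if i > 0 and not reachable[i-1]:
--                     if abs(heights[i] - heights[i-1]) <= h: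
--                         reachable[i-1] = True
--                         changed = True
--                 # Check right neighbor
--                 if i < n-1 and not reachable[i+1]:
--                     if abs(heights[i] - heights[i+1]) <= h:
--                         reachable[i+1] = True
--                         changed = True
--
--     return all(reachable)
-- ===== SOURCE B (Python) =====
-- def can_visit_all(heights, h):
--     """Check if all platforms can be visited with ladder height h"""
--     # Single linear pass: split into maximal segments at edges with |diff| > h;
--     # all platforms are visitable iff every segment contains a height <= h.
--     if not heights:
--         return True
--     seg_ok = heights[0] <= h
--     prev = heights[0]
--     for y in heights[1:]:
--         if abs(y - prev) > h:
--             if not seg_ok: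
--                 return False
--             seg_ok = y <= h
--         else:
--             seg_ok = seg_ok or y <= h
--         prev = y
--     return seg_ok
-- ===== Notes on version B (the rewrite author's own statement) =====
-- stated objective: faster
-- what changed: Replaced the repeated fixed-point propagation over a reachable array (re-scanning all platforms until no change) with a single linear scan that splits the platforms into maximal segments at edges with |diff| > h and checks that each segment contains a height <= h.
import Mathlib
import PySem

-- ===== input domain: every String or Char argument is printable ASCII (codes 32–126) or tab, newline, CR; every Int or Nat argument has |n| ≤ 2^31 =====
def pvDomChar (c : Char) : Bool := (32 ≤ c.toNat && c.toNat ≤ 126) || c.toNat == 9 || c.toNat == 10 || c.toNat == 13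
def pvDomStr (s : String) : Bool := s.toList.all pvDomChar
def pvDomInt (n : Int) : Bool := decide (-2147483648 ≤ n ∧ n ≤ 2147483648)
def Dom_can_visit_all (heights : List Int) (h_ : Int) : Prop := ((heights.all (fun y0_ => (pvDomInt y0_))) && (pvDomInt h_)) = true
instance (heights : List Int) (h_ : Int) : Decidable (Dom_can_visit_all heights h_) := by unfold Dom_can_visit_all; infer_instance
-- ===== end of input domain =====

-- B replaces A's repeated whole-array propagation passes (run until no change) by one
-- linear scan over segments split at edges with |diff| > h_; objective: faster (O(n) vs O(n^2)).

-- ===== PORT A =====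
-- literal transliteration of A: reachable array, init pass, then fixed-point passes.
-- Indices are always in range in the Python, so list reads are ported with getD (exact there);
-- the while-loop is ported with fuel n+1, which is proved sufficient below (at most n changing passes).
def pvInit (heights : List Int) (h_ : Int) : List Bool :=
  (List.range heights.length).foldl
    (fun r i => if heights.getD i 0 ≤ h_ then r.set i true else r)
    (List.replicate heights.length false)

def pvStepL (heights : List Int) (h_ : Int) (st : List Bool × Bool) (i : Nat) :
    List Bool × Bool :=
  if 0 < i ∧ st.1.getD (i - 1) false = false then
    (if |heights.getD i 0 - heights.getD (i - 1) 0| ≤ h_ then (st.1.set (i - 1) true, true)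
     else st)
  else st

def pvStepR (heights : List Int) (h_ : Int) (n : Nat) (st : List Bool × Bool) (i : Nat) :
    List Bool × Bool :=
  if i + 1 < n ∧ st.1.getD (i + 1) false = false then
    (if |heights.getD i 0 - heights.getD (i + 1) 0| ≤ h_ then (st.1.set (i + 1) true, true)
     else st)
  else st

def pvStep (heights : List Int) (h_ : Int) (n : Nat) (st : List Bool × Bool) (i : Nat) :
    List Bool × Bool :=
  if st.1.getD i false = true then pvStepR heights h_ n (pvStepL heights h_ st i) i else st

def pvPass (heights : List Int) (h_ : Int) (n : Nat) (r : List Bool) : List Bool × Bool :=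
  (List.range n).foldl (pvStep heights h_ n) (r, false)

def pvLoop (heights : List Int) (h_ : Int) (n : Nat) : Nat → List Bool → List Bool
  | 0, r => r
  | fuel + 1, r =>
      let p := pvPass heights h_ n r
      if p.2 then pvLoop heights h_ n fuel p.1 else p.1

def can_visit_all (heights : List Int) (h_ : Int) : Bool :=
  let n := heights.length
  (pvLoop heights h_ n (n + 1) (pvInit heights h_)).all (fun b => b)

-- ===== PORT B =====
-- literal transliteration of Source B: one scan, splitting at edges with |y - prev| > h_.
def pvGo (h_ : Int) : List Int → Int → Bool → Bool
  | [], _, segOk => segOk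
  | y :: t, prev, segOk =>
      if |y - prev| > h_ then
        if !segOk then false else pvGo h_ t y (decide (y ≤ h_))
      else pvGo h_ t y (segOk || decide (y ≤ h_))

def can_visit_all_alt (heights : List Int) (h_ : Int) : Bool :=
  match heights with
  | [] => true
  | x :: rest => pvGo h_ rest x (decide (x ≤ h_))

-- ===== PRECONDITION & SPEC =====
def Spec_can_visit_all (heights : List Int) (h_ : Int) (out : Bool) : Prop := out = can_visit_all_alt heights h_
instance (heights : List Int) (h_ : Int) (out : Bool) : Decidable (Spec_can_visit_all heights h_ out) := by unfold Spec_can_visit_all; infer_instance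

-- ===== CLAIM (what is proved, stated in full; the proofs are below) =====
def Claim_equal_can_visit_all : Prop := ∀ (heights : List Int) (h_ : Int), Dom_can_visit_all heights h_ → Spec_can_visit_all heights h_ (can_visit_all heights h_)

-- ===== LEMMAS AND PROOFS =====

-- Common semantic spec: platform i is reachable iff some j with heights[j] ≤ h_ is connected
-- to i through a contiguous interval of edges of difference ≤ h_.
def pvG (hts : List Int) (i : Nat) : Int := hts.getD i 0

def pvEdge (hts : List Int) (h_ : Int) (k : Nat) : Prop :=
  k + 1 < hts.length ∧ |pvG hts (k + 1) - pvG hts k| ≤ h_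

def pvConn (hts : List Int) (h_ : Int) (i j : Nat) : Prop :=
  ∀ k, min i j ≤ k → k < max i j → pvEdge hts h_ k

def pvReach (hts : List Int) (h_ : Int) (i : Nat) : Prop :=
  ∃ j, j < hts.length ∧ pvG hts j ≤ h_ ∧ pvConn hts h_ i j

theorem conn_self (hts : List Int) (h_ : Int) (i : Nat) : pvConn hts h_ i i := by
  intro k hk1 hk2; omega

theorem conn_comm (hts : List Int) (h_ : Int) (i j : Nat) (h : pvConn hts h_ i j) :
    pvConn hts h_ j i := by
  intro k hk1 hk2; exact h k (by omega) (by omega)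

theorem edge_cons_succ (x : Int) (l : List Int) (h_ : Int) (k : Nat) :
    pvEdge (x :: l) h_ (k + 1) ↔ pvEdge l h_ k := by
  simp [pvEdge, pvG]

theorem conn_cons_succ (x : Int) (l : List Int) (h_ : Int) (i j : Nat) :
    pvConn (x :: l) h_ (i + 1) (j + 1) ↔ pvConn l h_ i j := by
  constructor
  · intro h k hk1 hk2
    exact (edge_cons_succ x l h_ k).mp (h (k + 1) (by omega) (by omega))
  · intro h k hk1 hk2
    obtain ⟨k', rfl⟩ : ∃ k', k = k' + 1 := ⟨k - 1, by omega⟩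
    exact (edge_cons_succ x l h_ k').mpr (h k' (by omega) (by omega))

theorem conn_pos_zero_edge (hts : List Int) (h_ : Int) (i : Nat) (hi : 0 < i)
    (h : pvConn hts h_ i 0) : pvEdge hts h_ 0 :=
  h 0 (by omega) (by omega)

theorem conn_cons_zero (x : Int) (l : List Int) (h_ : Int) (i : Nat) :
    pvConn (x :: l) h_ (i + 1) 0 ↔ pvEdge (x :: l) h_ 0 ∧ pvConn l h_ i 0 := by
  constructor
  · intro h
    refine ⟨conn_pos_zero_edge _ _ _ (by omega) h, ?_⟩
    have : pvConn (x :: l) h_ (i + 1) 1 := by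
      intro k hk1 hk2; exact h k (by omega) (by omega)
    exact (conn_cons_succ x l h_ i 0).mp this
  · rintro ⟨he, hc⟩
    intro k hk1 hk2
    match k with
    | 0 => exact he
    | k' + 1 =>
      exact (edge_cons_succ x l h_ k').mpr (hc k' (by omega) (by omega))

theorem conn_zero_one (hts : List Int) (h_ : Int) (he : pvEdge hts h_ 0) :
    pvConn hts h_ 0 1 := by
  intro k hk1 hk2
  have : k = 0 := by omega
  subst this; exact he

theorem go_char (h_ : Int) (l : List Int) : ∀ (prev : Int) (sOk : Bool),
    (prev ≤ h_ → sOk = true) →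
    (pvGo h_ l prev sOk = true ↔
      ∀ i < l.length + 1,
        (∃ j, j < l.length + 1 ∧ pvG (prev :: l) j ≤ h_ ∧ pvConn (prev :: l) h_ i j) ∨
        (sOk = true ∧ pvConn (prev :: l) h_ i 0)) := by
  induction l with
  | nil =>
    intro prev sOk hp
    simp only [pvGo, List.length_nil]
    constructor
    · intro hs i hi
      refine Or.inr ⟨hs, ?_⟩
      have hi0 : i = 0 := by omega
      subst hi0; exact conn_self _ _ _
    · intro h
      rcases h 0 (by omega) with ⟨j, hj, hgj, _⟩ | ⟨hs, _⟩
      · have : j = 0 := by omega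
        subst this
        exact hp (by simpa [pvG] using hgj)
      · exact hs
  | cons y t ih =>
    intro prev sOk hp
    simp only [List.length_cons]
    by_cases hbr : |y - prev| > h_
    · -- break between prev and y : edge 0 of (prev :: y :: t) fails
      have hne : ¬ pvEdge (prev :: y :: t) h_ 0 := by
        simp [pvEdge, pvG]; omega
      have hgo : pvGo h_ (y :: t) prev sOk = true ↔
          sOk = true ∧ pvGo h_ t y (decide (y ≤ h_)) = true := by
        simp only [pvGo, if_pos hbr]
        cases sOk <;> simp
      rw [hgo, ih y (decide (y ≤ h_)) (by simp)]
      constructor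
      · rintro ⟨hs, hq⟩ i hi
        match i with
        | 0 => exact Or.inr ⟨hs, conn_self _ _ _⟩
        | i' + 1 =>
          rcases hq i' (by omega) with ⟨j', hj', hg', hc'⟩ | ⟨hy, hc'⟩
          · exact Or.inl ⟨j' + 1, by omega,
              by simpa [pvG] using hg', (conn_cons_succ _ _ _ _ _).mpr hc'⟩
          · exact Or.inl ⟨1, by omega, by simpa [pvG] using of_decide_eq_true hy,
              (conn_cons_succ _ _ _ _ 0).mpr hc'⟩
      · intro h
        have hs : sOk = true := by
          rcases h 0 (by omega) with ⟨j, hj, hgj, hcj⟩ | ⟨hs, _⟩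
          · match j with
            | 0 => exact hp (by simpa [pvG] using hgj)
            | j' + 1 => exact absurd (conn_pos_zero_edge _ _ _ (by omega)
                (conn_comm _ _ _ _ hcj)) hne
          · exact hs
        refine ⟨hs, fun i' hi' => ?_⟩
        rcases h (i' + 1) (by omega) with ⟨j, hj, hgj, hcj⟩ | ⟨_, hcj⟩
        · match j with
          | 0 => exact absurd (conn_pos_zero_edge _ _ _ (by omega) hcj) hne
          | j' + 1 =>
            exact Or.inl ⟨j', by omega, by simpa [pvG] using hgj,
              (conn_cons_succ _ _ _ _ _).mp hcj⟩
        · exact absurd (conn_pos_zero_edge _ _ _ (by omega) hcj) hne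
    · -- edge 0 of (prev :: y :: t) holds
      have he : pvEdge (prev :: y :: t) h_ 0 := by
        simp [pvEdge, pvG]; omega
      have hgo : pvGo h_ (y :: t) prev sOk = pvGo h_ t y (sOk || decide (y ≤ h_)) := by
        simp only [pvGo, if_neg hbr]
      rw [hgo, ih y (sOk || decide (y ≤ h_)) (by intro hy; simp [hy])]
      constructor
      · intro hq i hi
        match i with
        | 0 =>
          rcases hq 0 (by omega) with ⟨j', hj', hg', hc'⟩ | ⟨hsy, hc'⟩
          · refine Or.inl ⟨j' + 1, by omega, by simpa [pvG] using hg', ?_⟩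
            exact conn_comm _ _ _ _ ((conn_cons_zero _ _ _ _).mpr ⟨he, conn_comm _ _ _ _ hc'⟩)
          · rcases Bool.or_eq_true_iff.mp hsy with hs | hy
            · exact Or.inr ⟨hs, conn_self _ _ _⟩
            · exact Or.inl ⟨1, by omega, by simpa [pvG] using of_decide_eq_true hy,
                conn_zero_one _ _ he⟩
        | i' + 1 =>
          rcases hq i' (by omega) with ⟨j', hj', hg', hc'⟩ | ⟨hsy, hc'⟩
          · exact Or.inl ⟨j' + 1, by omega, by simpa [pvG] using hg',
              (conn_cons_succ _ _ _ _ _).mpr hc'⟩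
          · rcases Bool.or_eq_true_iff.mp hsy with hs | hy
            · exact Or.inr ⟨hs, (conn_cons_zero _ _ _ _).mpr ⟨he, hc'⟩⟩
            · exact Or.inl ⟨1, by omega, by simpa [pvG] using of_decide_eq_true hy,
                (conn_cons_succ _ _ _ _ 0).mpr hc'⟩
      · intro h i' hi'
        rcases h (i' + 1) (by omega) with ⟨j, hj, hgj, hcj⟩ | ⟨hs, hcj⟩
        · match j with
          | 0 =>
            refine Or.inr ⟨by simp [hp (by simpa [pvG] using hgj)],
              ((conn_cons_zero _ _ _ _).mp hcj).2⟩
          | j' + 1 =>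
            exact Or.inl ⟨j', by omega, by simpa [pvG] using hgj,
              (conn_cons_succ _ _ _ _ _).mp hcj⟩
        · exact Or.inr ⟨by simp [hs], ((conn_cons_zero _ _ _ _).mp hcj).2⟩

theorem thmB_iff (hts : List Int) (h_ : Int) :
    can_visit_all_alt hts h_ = true ↔ ∀ i < hts.length, pvReach hts h_ i := by
  match hts with
  | [] => simp [can_visit_all_alt]
  | x :: rest =>
    simp only [can_visit_all_alt]
    rw [go_char h_ rest x (decide (x ≤ h_)) (by simp)]
    simp only [List.length_cons]
    constructor
    · intro h i hi
      rcases h i hi with ⟨j, hj, hgj, hcj⟩ | ⟨hx, hcj⟩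
      · exact ⟨j, hj, hgj, hcj⟩
      · exact ⟨0, by simp, by simpa [pvG] using of_decide_eq_true hx, hcj⟩
    · intro h i hi
      obtain ⟨j, hj, hgj, hcj⟩ := h i hi
      exact Or.inl ⟨j, hj, hgj, hcj⟩

-- A-side invariants
def pvSound (hts : List Int) (h_ : Int) (r : List Bool) : Prop :=
  ∀ k, r.getD k false = true → pvReach hts h_ k

def pvBase (hts : List Int) (h_ : Int) (r : List Bool) : Prop :=
  ∀ k, k < hts.length → pvG hts k ≤ h_ → r.getD k false = true

def pvClosedAt (hts : List Int) (h_ : Int) (r : List Bool) (i : Nat) : Prop :=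
  r.getD i false = true →
    (0 < i → |pvG hts i - pvG hts (i - 1)| ≤ h_ → r.getD (i - 1) false = true) ∧
    (i + 1 < hts.length → |pvG hts i - pvG hts (i + 1)| ≤ h_ → r.getD (i + 1) false = true)

theorem getD_set_self (r : List Bool) (j : Nat) (hj : j < r.length) :
    (r.set j true).getD j false = true := by
  simp [List.getD_eq_getElem?_getD, hj]

theorem getD_set_ne (r : List Bool) (j k : Nat) (h : k ≠ j) :
    (r.set j true).getD k false = r.getD k false := by
  simp [List.getD_eq_getElem?_getD, Ne.symm h]

theorem count_set_true : ∀ (r : List Bool) (j : Nat), j < r.length →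
    r.getD j false = false → (r.set j true).count true = r.count true + 1 := by
  intro r
  induction r with
  | nil => intro j hj; simp at hj
  | cons b t iht =>
    intro j hj hf
    match j with
    | 0 =>
      simp only [List.getD_cons_zero] at hf
      subst hf
      simp
    | j' + 1 =>
      simp only [List.getD_cons_succ] at hf
      simp only [List.set_cons_succ, List.count_cons]
      rw [iht j' (by simp only [List.length_cons] at hj; omega) hf]
      omega

theorem count_set_ge : ∀ (r : List Bool) (j : Nat),
    r.count true ≤ (r.set j true).count true := by
  intro r
  induction r with
  | nil => intro j; simp
  | cons b t iht =>
    intro j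
    match j with
    | 0 =>
      simp only [List.set_cons_zero, List.count_cons]
      cases b <;> simp
    | j' + 1 =>
      simp only [List.set_cons_succ, List.count_cons]
      have := iht j'
      omega

-- connectivity extension along one ok edge
theorem conn_extend_pred (hts : List Int) (h_ : Int) (i j : Nat) (hi : 0 < i)
    (he : pvEdge hts h_ (i - 1)) (hc : pvConn hts h_ i j) : pvConn hts h_ (i - 1) j := by
  intro k hk1 hk2
  by_cases hk : k = i - 1
  · subst hk; exact he
  · exact hc k (by omega) (by omega)

theorem conn_extend_succ (hts : List Int) (h_ : Int) (i j : Nat)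
    (he : pvEdge hts h_ i) (hc : pvConn hts h_ i j) : pvConn hts h_ (i + 1) j := by
  intro k hk1 hk2
  by_cases hk : k = i
  · subst hk; exact he
  · exact hc k (by omega) (by omega)

theorem reach_left (hts : List Int) (h_ : Int) (i : Nat) (hi0 : 0 < i) (hi : i < hts.length)
    (habs : |pvG hts i - pvG hts (i - 1)| ≤ h_) (hr : pvReach hts h_ i) :
    pvReach hts h_ (i - 1) := by
  obtain ⟨j, hj, hgj, hc⟩ := hr
  have he : pvEdge hts h_ (i - 1) := by
    have hii : i - 1 + 1 = i := by omega
    refine ⟨by omega, ?_⟩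
    rw [hii, abs_sub_comm] at *
    exact habs
  exact ⟨j, hj, hgj, conn_extend_pred hts h_ i j hi0 he hc⟩

theorem reach_right (hts : List Int) (h_ : Int) (i : Nat) (hi : i + 1 < hts.length)
    (habs : |pvG hts i - pvG hts (i + 1)| ≤ h_) (hr : pvReach hts h_ i) :
    pvReach hts h_ (i + 1) := by
  obtain ⟨j, hj, hgj, hc⟩ := hr
  have he : pvEdge hts h_ i := ⟨hi, by rw [abs_sub_comm] at habs; exact habs⟩
  exact ⟨j, hj, hgj, conn_extend_succ hts h_ i j he hc⟩

-- properties of updating one provably-reachable index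
theorem set_props (hts : List Int) (h_ : Int) (r : List Bool) (j : Nat)
    (hj : j < hts.length) (hlen : r.length = hts.length) (hs : pvSound hts h_ r)
    (hr : pvReach hts h_ j) :
    (r.set j true).length = hts.length ∧ pvSound hts h_ (r.set j true) ∧
    r.count true ≤ (r.set j true).count true ∧
    (r.getD j false = false → r.count true < (r.set j true).count true) ∧
    (∀ k, r.getD k false = true → (r.set j true).getD k false = true) := by
  refine ⟨by simp [hlen], ?_, count_set_ge r j, ?_, ?_⟩
  · intro k hk
    by_cases hkj : k = j
    · subst hkj; exact hr
    · exact hs k (by rwa [getD_set_ne r j k hkj] at hk)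
  · intro hf
    rw [count_set_true r j (by rw [hlen]; exact hj) hf]; omega
  · intro k hk
    by_cases hkj : k = j
    · rw [hkj]; exact getD_set_self r j (by rw [hlen]; exact hj)
    · rwa [getD_set_ne r j k hkj]

-- one pvStep preserves everything and grows the count strictly when it sets the flag
theorem step_one (hts : List Int) (h_ : Int) (st : List Bool × Bool) (i : Nat)
    (hi : i < hts.length) (hlen : st.1.length = hts.length) (hs : pvSound hts h_ st.1) :
    (pvStep hts h_ hts.length st i).1.length = hts.length ∧
    pvSound hts h_ (pvStep hts h_ hts.length st i).1 ∧
    st.1.count true ≤ (pvStep hts h_ hts.length st i).1.count true ∧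
    ((pvStep hts h_ hts.length st i).2 = true →
      st.2 = true ∨ st.1.count true < (pvStep hts h_ hts.length st i).1.count true) ∧
    (st.2 = true → (pvStep hts h_ hts.length st i).2 = true) ∧
    (∀ k, st.1.getD k false = true → (pvStep hts h_ hts.length st i).1.getD k false = true) := by
  by_cases h1 : st.1.getD i false = true
  · have hri : pvReach hts h_ i := hs i h1
    -- left half
    have hL : (pvStepL hts h_ st i).1.length = hts.length ∧
        pvSound hts h_ (pvStepL hts h_ st i).1 ∧
        st.1.count true ≤ (pvStepL hts h_ st i).1.count true ∧
        ((pvStepL hts h_ st i).2 = true →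
          st.2 = true ∨ st.1.count true < (pvStepL hts h_ st i).1.count true) ∧
        (st.2 = true → (pvStepL hts h_ st i).2 = true) ∧
        (∀ k, st.1.getD k false = true → (pvStepL hts h_ st i).1.getD k false = true) := by
      by_cases h2 : 0 < i ∧ st.1.getD (i - 1) false = false
      · by_cases h3 : |hts.getD i 0 - hts.getD (i - 1) 0| ≤ h_
        · have hr' : pvReach hts h_ (i - 1) :=
            reach_left hts h_ i h2.1 hi (by simpa [pvG] using h3) hri
          obtain ⟨p1, p2, p3, p4, p5⟩ :=
            set_props hts h_ st.1 (i - 1) (by omega) hlen hs hr'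
          rw [pvStepL, if_pos h2, if_pos h3]
          exact ⟨p1, p2, p3, fun _ => Or.inr (p4 h2.2), fun _ => rfl, p5⟩
        · rw [pvStepL, if_pos h2, if_neg h3]
          exact ⟨hlen, hs, le_refl _, fun h => Or.inl h, fun h => h, fun k hk => hk⟩
      · rw [pvStepL, if_neg h2]
        exact ⟨hlen, hs, le_refl _, fun h => Or.inl h, fun h => h, fun k hk => hk⟩
    obtain ⟨q1, q2, q3, q4, q5, q6⟩ := hL
    -- right half, applied to the left half's result
    have hR : (pvStepR hts h_ hts.length (pvStepL hts h_ st i) i).1.length = hts.length ∧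
        pvSound hts h_ (pvStepR hts h_ hts.length (pvStepL hts h_ st i) i).1 ∧
        (pvStepL hts h_ st i).1.count true ≤
          (pvStepR hts h_ hts.length (pvStepL hts h_ st i) i).1.count true ∧
        ((pvStepR hts h_ hts.length (pvStepL hts h_ st i) i).2 = true →
          (pvStepL hts h_ st i).2 = true ∨
          (pvStepL hts h_ st i).1.count true <
            (pvStepR hts h_ hts.length (pvStepL hts h_ st i) i).1.count true) ∧
        ((pvStepL hts h_ st i).2 = true →
          (pvStepR hts h_ hts.length (pvStepL hts h_ st i) i).2 = true) ∧
        (∀ k, (pvStepL hts h_ st i).1.getD k false = true →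
          (pvStepR hts h_ hts.length (pvStepL hts h_ st i) i).1.getD k false = true) := by
      have hriL : pvReach hts h_ i := hri
      by_cases h2 : i + 1 < hts.length ∧ (pvStepL hts h_ st i).1.getD (i + 1) false = false
      · by_cases h3 : |hts.getD i 0 - hts.getD (i + 1) 0| ≤ h_
        · have hr' : pvReach hts h_ (i + 1) :=
            reach_right hts h_ i h2.1 (by simpa [pvG] using h3) hriL
          obtain ⟨p1, p2, p3, p4, p5⟩ :=
            set_props hts h_ (pvStepL hts h_ st i).1 (i + 1) h2.1 q1 q2 hr'
          rw [pvStepR, if_pos h2, if_pos h3]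
          exact ⟨p1, p2, p3, fun _ => Or.inr (p4 h2.2), fun _ => rfl, p5⟩
        · rw [pvStepR, if_pos h2, if_neg h3]
          exact ⟨q1, q2, le_refl _, fun h => Or.inl h, fun h => h, fun k hk => hk⟩
      · rw [pvStepR, if_neg h2]
        exact ⟨q1, q2, le_refl _, fun h => Or.inl h, fun h => h, fun k hk => hk⟩
    obtain ⟨w1, w2, w3, w4, w5, w6⟩ := hR
    have hstep : pvStep hts h_ hts.length st i =
        pvStepR hts h_ hts.length (pvStepL hts h_ st i) i := by
      rw [pvStep, if_pos h1]
    rw [hstep]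
    refine ⟨w1, w2, le_trans q3 w3, ?_, fun h => w5 (q5 h), fun k hk => w6 k (q6 k hk)⟩
    intro hf
    rcases w4 hf with hfl | hlt
    · rcases q4 hfl with h | h
      · exact Or.inl h
      · exact Or.inr (lt_of_lt_of_le h w3)
    · exact Or.inr (lt_of_le_of_lt q3 hlt)
  · have hstep : pvStep hts h_ hts.length st i = st := by
      rw [pvStep, if_neg h1]
    rw [hstep]
    exact ⟨hlen, hs, le_refl _, fun h => Or.inl h, fun h => h, fun k hk => hk⟩

-- fold of pvStep over a list of in-range indices
theorem pass_aux (hts : List Int) (h_ : Int) :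
    ∀ (l : List Nat) (st : List Bool × Bool), (∀ i ∈ l, i < hts.length) →
    st.1.length = hts.length → pvSound hts h_ st.1 →
    (l.foldl (pvStep hts h_ hts.length) st).1.length = hts.length ∧
    pvSound hts h_ (l.foldl (pvStep hts h_ hts.length) st).1 ∧
    st.1.count true ≤ (l.foldl (pvStep hts h_ hts.length) st).1.count true ∧
    ((l.foldl (pvStep hts h_ hts.length) st).2 = true →
      st.2 = true ∨ st.1.count true < (l.foldl (pvStep hts h_ hts.length) st).1.count true) ∧
    (st.2 = true → (l.foldl (pvStep hts h_ hts.length) st).2 = true) ∧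
    (∀ k, st.1.getD k false = true →
      (l.foldl (pvStep hts h_ hts.length) st).1.getD k false = true) := by
  intro l
  induction l with
  | nil =>
    intro st _ hlen hs
    exact ⟨hlen, hs, le_refl _, fun h => Or.inl h, fun h => h, fun k hk => hk⟩
  | cons i l ihl =>
    intro st hmem hlen hs
    obtain ⟨s1, s2, s3, s4, s5, s6⟩ :=
      step_one hts h_ st i (hmem i (by simp)) hlen hs
    obtain ⟨t1, t2, t3, t4, t5, t6⟩ :=
      ihl (pvStep hts h_ hts.length st i) (fun j hj => hmem j (by simp [hj])) s1 s2
    simp only [List.foldl_cons]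
    refine ⟨t1, t2, le_trans s3 t3, ?_, fun h => t5 (s5 h), fun k hk => t6 k (s6 k hk)⟩
    intro hf
    rcases t4 hf with hfl | hlt
    · rcases s4 hfl with h | h
      · exact Or.inl h
      · exact Or.inr (lt_of_lt_of_le h t3)
    · exact Or.inr (lt_of_le_of_lt s3 hlt)

-- a step that leaves the flag false changed nothing and certifies local closure
theorem step_nochange (hts : List Int) (h_ : Int) (r : List Bool) (i : Nat)
    (hflag : (pvStep hts h_ hts.length (r, false) i).2 = false) :
    pvStep hts h_ hts.length (r, false) i = (r, false) ∧ pvClosedAt hts h_ r i := by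
  by_cases h1 : r.getD i false = true
  · have hstep : pvStep hts h_ hts.length (r, false) i =
        pvStepR hts h_ hts.length (pvStepL hts h_ (r, false) i) i := by
      rw [pvStep]; simp only [h1, if_pos]
    rw [hstep] at hflag ⊢
    -- analyse left half
    have hLkeep : pvStepL hts h_ (r, false) i = (r, false) ∧
        (0 < i → |pvG hts i - pvG hts (i - 1)| ≤ h_ → r.getD (i - 1) false = true) := by
      by_cases h2 : 0 < i ∧ (r, false).1.getD (i - 1) false = false
      · by_cases h3 : |hts.getD i 0 - hts.getD (i - 1) 0| ≤ h_
        · exfalso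
          have : pvStepL hts h_ (r, false) i = (r.set (i - 1) true, true) := by
            rw [pvStepL, if_pos h2, if_pos h3]
          rw [this] at hflag
          -- right half preserves a true flag
          have : (pvStepR hts h_ hts.length (r.set (i - 1) true, true) i).2 = true := by
            rw [pvStepR]
            split_ifs with h4 h5 <;> rfl
          rw [this] at hflag; exact absurd hflag (by simp)
        · have heq : pvStepL hts h_ (r, false) i = (r, false) := by
            rw [pvStepL, if_pos h2, if_neg h3]
          exact ⟨heq, fun hi0 habs => absurd (by simpa [pvG] using habs) h3⟩
      · have heq : pvStepL hts h_ (r, false) i = (r, false) := by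
          rw [pvStepL, if_neg h2]
        refine ⟨heq, fun hi0 habs => ?_⟩
        simp only [not_and] at h2
        have := h2 hi0
        simpa using this
    obtain ⟨hLeq, hLcl⟩ := hLkeep
    rw [hLeq] at hflag ⊢
    -- analyse right half
    have hRkeep : pvStepR hts h_ hts.length (r, false) i = (r, false) ∧
        (i + 1 < hts.length → |pvG hts i - pvG hts (i + 1)| ≤ h_ →
          r.getD (i + 1) false = true) := by
      by_cases h2 : i + 1 < hts.length ∧ (r, false).1.getD (i + 1) false = false
      · by_cases h3 : |hts.getD i 0 - hts.getD (i + 1) 0| ≤ h_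
        · exfalso
          have : pvStepR hts h_ hts.length (r, false) i = (r.set (i + 1) true, true) := by
            rw [pvStepR, if_pos h2, if_pos h3]
          rw [this] at hflag; exact absurd hflag (by simp)
        · have heq : pvStepR hts h_ hts.length (r, false) i = (r, false) := by
            rw [pvStepR, if_pos h2, if_neg h3]
          exact ⟨heq, fun hi1 habs => absurd (by simpa [pvG] using habs) h3⟩
      · have heq : pvStepR hts h_ hts.length (r, false) i = (r, false) := by
          rw [pvStepR, if_neg h2]
        refine ⟨heq, fun hi1 habs => ?_⟩
        simp only [not_and] at h2
        have := h2 hi1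
        simpa using this
    obtain ⟨hReq, hRcl⟩ := hRkeep
    exact ⟨hReq, fun _ => ⟨hLcl, hRcl⟩⟩
  · have hstep : pvStep hts h_ hts.length (r, false) i = (r, false) := by
      rw [pvStep, if_neg h1]
    exact ⟨hstep, fun habs => absurd habs h1⟩

-- an unchanged pass is the identity and certifies closure at every visited index
theorem pass_nochange_aux (hts : List Int) (h_ : Int) :
    ∀ (l : List Nat) (r : List Bool), (∀ i ∈ l, i < hts.length) →
    r.length = hts.length → pvSound hts h_ r →
    (l.foldl (pvStep hts h_ hts.length) (r, false)).2 = false →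
    (l.foldl (pvStep hts h_ hts.length) (r, false)).1 = r ∧
    ∀ i ∈ l, pvClosedAt hts h_ r i := by
  intro l
  induction l with
  | nil => intro r _ _ _ _; exact ⟨rfl, by simp⟩
  | cons i l ihl =>
    intro r hmem hlen hs hflag
    simp only [List.foldl_cons] at hflag ⊢
    have hs1flag : (pvStep hts h_ hts.length (r, false) i).2 = false := by
      by_contra hc
      have htrue : (pvStep hts h_ hts.length (r, false) i).2 = true := by
        cases h : (pvStep hts h_ hts.length (r, false) i).2
        · exact absurd h hc
        · rfl
      obtain ⟨_, _, _, _, _, _⟩ := step_one hts h_ (r, false) i (hmem i (by simp)) hlen hs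
      -- flag monotone along the rest of the fold
      obtain ⟨s1, s2, _, _, _, _⟩ := step_one hts h_ (r, false) i (hmem i (by simp)) hlen hs
      obtain ⟨_, _, _, _, t5, _⟩ :=
        pass_aux hts h_ l (pvStep hts h_ hts.length (r, false) i)
          (fun j hj => hmem j (by simp [hj])) s1 s2
      rw [t5 htrue] at hflag
      exact absurd hflag (by simp)
    obtain ⟨heq, hcl⟩ := step_nochange hts h_ r i hs1flag
    rw [heq] at hflag ⊢
    obtain ⟨heq2, hcl2⟩ := ihl r (fun j hj => hmem j (by simp [hj])) hlen hs hflag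
    refine ⟨heq2, fun j hj => ?_⟩
    rcases List.mem_cons.mp hj with hji | hjl
    · subst hji; exact hcl
    · exact hcl2 j hjl

-- the fuelled loop reaches a sound, closed state containing the start
theorem loop_props (hts : List Int) (h_ : Int) :
    ∀ (fuel : Nat) (r : List Bool), r.length = hts.length → pvSound hts h_ r →
    hts.length < r.count true + fuel →
    (pvLoop hts h_ hts.length fuel r).length = hts.length ∧
    pvSound hts h_ (pvLoop hts h_ hts.length fuel r) ∧
    (∀ k, r.getD k false = true → (pvLoop hts h_ hts.length fuel r).getD k false = true) ∧
    (∀ i, i < hts.length → pvClosedAt hts h_ (pvLoop hts h_ hts.length fuel r) i) := by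
  intro fuel
  induction fuel with
  | zero =>
    intro r hlen hs hcnt
    exfalso
    have := List.count_le_length (a := true) (l := r)
    omega
  | succ fuel ihf =>
    intro r hlen hs hcnt
    have hmem : ∀ i ∈ List.range hts.length, i < hts.length := by
      intro i hi; exact List.mem_range.mp hi
    by_cases hflag : (pvPass hts h_ hts.length r).2 = true
    · obtain ⟨p1, p2, p3, p4, _, p6⟩ :=
        pass_aux hts h_ (List.range hts.length) (r, false) hmem hlen hs
      have hlt : r.count true < (pvPass hts h_ hts.length r).1.count true := by
        rcases p4 hflag with h | h
        · exact absurd h (by simp)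
        · exact h
      have hloop : pvLoop hts h_ hts.length (fuel + 1) r =
          pvLoop hts h_ hts.length fuel (pvPass hts h_ hts.length r).1 := by
        simp only [pvLoop]
        rw [hflag]
        simp
      rw [hloop]
      obtain ⟨w1, w2, w3, w4⟩ := ihf (pvPass hts h_ hts.length r).1 p1 p2 (by omega)
      exact ⟨w1, w2, fun k hk => w3 k (p6 k hk), w4⟩
    · have hflag' : (pvPass hts h_ hts.length r).2 = false := by
        cases h : (pvPass hts h_ hts.length r).2
        · rfl
        · exact absurd h hflag
      obtain ⟨heq, hcl⟩ := pass_nochange_aux hts h_ (List.range hts.length) r hmem hlen hs hflag'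
      have hloop : pvLoop hts h_ hts.length (fuel + 1) r = (pvPass hts h_ hts.length r).1 := by
        simp only [pvLoop]
        rw [hflag']
        simp
      have heq' : (pvPass hts h_ hts.length r).1 = r := heq
      rw [hloop, heq']
      exact ⟨hlen, hs, fun k hk => hk, fun i hi => hcl i (List.mem_range.mpr hi)⟩

-- init characterisation
theorem init_aux (hts : List Int) (h_ : Int) :
    ∀ (l : List Nat) (r : List Bool) (k : Nat), (∀ i ∈ l, i < r.length) →
    ((l.foldl (fun r i => if hts.getD i 0 ≤ h_ then r.set i true else r) r).getD k false = true ↔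
      (k ∈ l ∧ pvG hts k ≤ h_) ∨ r.getD k false = true) := by
  intro l
  induction l with
  | nil => intro r k _; simp
  | cons i l ihl =>
    intro r k hmem
    simp only [List.foldl_cons]
    by_cases hgi : hts.getD i 0 ≤ h_
    · rw [if_pos hgi]
      rw [ihl (r.set i true) k (by intro j hj; rw [List.length_set]; exact hmem j (by simp [hj]))]
      by_cases hki : k = i
      · subst hki
        constructor
        · intro _; exact Or.inl ⟨by simp, by simpa [pvG] using hgi⟩
        · intro _; exact Or.inr (getD_set_self r k (hmem k (by simp)))
      · rw [getD_set_ne r i k hki]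
        constructor
        · rintro (⟨hkl, hgk⟩ | hr)
          · exact Or.inl ⟨by simp [hkl], hgk⟩
          · exact Or.inr hr
        · rintro (⟨hkl, hgk⟩ | hr)
          · rcases List.mem_cons.mp hkl with h | h
            · exact absurd h hki
            · exact Or.inl ⟨h, hgk⟩
          · exact Or.inr hr
    · rw [if_neg hgi]
      rw [ihl r k (fun j hj => hmem j (by simp [hj]))]
      constructor
      · rintro (⟨hkl, hgk⟩ | hr)
        · exact Or.inl ⟨by simp [hkl], hgk⟩
        · exact Or.inr hr
      · rintro (⟨hkl, hgk⟩ | hr)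
        · rcases List.mem_cons.mp hkl with h | h
          · subst h; exact absurd (by simpa [pvG] using hgk) hgi
          · exact Or.inl ⟨h, hgk⟩
        · exact Or.inr hr

theorem init_getD (hts : List Int) (h_ : Int) (k : Nat) :
    (pvInit hts h_).getD k false = true ↔ k < hts.length ∧ pvG hts k ≤ h_ := by
  rw [pvInit, init_aux hts h_ (List.range hts.length) (List.replicate hts.length false) k
    (by intro i hi; simp only [List.length_replicate]; exact List.mem_range.mp hi)]
  simp [List.mem_range]

theorem init_len (hts : List Int) (h_ : Int) : (pvInit hts h_).length = hts.length := by
  rw [pvInit]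
  have : ∀ (l : List Nat) (r : List Bool),
      (l.foldl (fun r i => if hts.getD i 0 ≤ h_ then r.set i true else r) r).length =
        r.length := by
    intro l
    induction l with
    | nil => intro r; rfl
    | cons i l ihl =>
      intro r
      simp only [List.foldl_cons]
      rw [ihl]
      split_ifs <;> simp
  rw [this]; simp

-- completeness walks through a closed state
theorem walk_up (hts : List Int) (h_ : Int) (r : List Bool)
    (hcl : ∀ i, i < hts.length → pvClosedAt hts h_ r i) (j : Nat) :
    ∀ i, j ≤ i → i < hts.length → pvConn hts h_ j i → r.getD j false = true →
      r.getD i false = true := by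
  intro i
  induction i with
  | zero =>
    intro hji _ _ hrj
    have hj0 : j = 0 := by omega
    subst hj0
    exact hrj
  | succ i ihi =>
    intro hji hi hc hrj
    by_cases hje : j = i + 1
    · subst hje; exact hrj
    · have hji' : j ≤ i := by omega
      have he : pvEdge hts h_ i := hc i (by omega) (by omega)
      have hri : r.getD i false = true :=
        ihi hji' (by omega) (fun k hk1 hk2 => hc k (by omega) (by omega)) hrj
      have := (hcl i (by omega) hri).2 he.1
      apply this
      rw [abs_sub_comm]
      exact he.2

theorem walk_down (hts : List Int) (h_ : Int) (r : List Bool)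
    (hcl : ∀ i, i < hts.length → pvClosedAt hts h_ r i) (i : Nat) :
    ∀ j, i ≤ j → j < hts.length → pvConn hts h_ i j → r.getD j false = true →
      r.getD i false = true := by
  intro j
  induction j with
  | zero =>
    intro hij _ _ hrj
    have hi0 : i = 0 := by omega
    subst hi0
    exact hrj
  | succ j ihj =>
    intro hij hj hc hrj
    by_cases hie : i = j + 1
    · subst hie; exact hrj
    · have hij' : i ≤ j := by omega
      have he : pvEdge hts h_ j := hc j (by omega) (by omega)
      have hrjj : r.getD j false = true := by
        have := (hcl (j + 1) hj hrj).1 (by omega)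
        have h2 := this ?_
        · simpa using h2
        · simp only [Nat.add_sub_cancel]
          exact he.2
      exact ihj hij' (by omega) (fun k hk1 hk2 => hc k (by omega) (by omega)) hrjj

theorem complete_closed (hts : List Int) (h_ : Int) (r : List Bool)
    (hcl : ∀ i, i < hts.length → pvClosedAt hts h_ r i)
    (hb : pvBase hts h_ r) (i : Nat) (hi : i < hts.length) (hr : pvReach hts h_ i) :
    r.getD i false = true := by
  obtain ⟨j, hj, hgj, hc⟩ := hr
  have hrj : r.getD j false = true := hb j hj hgj
  by_cases hij : i ≤ j
  · exact walk_down hts h_ r hcl i j hij hj hc hrj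
  · exact walk_up hts h_ r hcl j i (by omega) hi (conn_comm hts h_ i j hc) hrj

theorem all_getD (r : List Bool) :
    (r.all (fun b => b) = true) ↔ ∀ i, i < r.length → r.getD i false = true := by
  induction r with
  | nil => simp
  | cons b t iht =>
    simp only [List.all_cons, Bool.and_eq_true, iht, List.length_cons]
    constructor
    · rintro ⟨hb, ht⟩ i hi
      match i with
      | 0 => simpa using hb
      | i' + 1 => exact ht i' (by omega)
    · intro h
      refine ⟨by simpa using h 0 (by omega), fun i hi => h (i + 1) (by omega)⟩

theorem thmA_iff (hts : List Int) (h_ : Int) :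
    can_visit_all hts h_ = true ↔ ∀ i < hts.length, pvReach hts h_ i := by
  have hilen := init_len hts h_
  have hisound : pvSound hts h_ (pvInit hts h_) := by
    intro k hk
    obtain ⟨hk1, hk2⟩ := (init_getD hts h_ k).mp hk
    exact ⟨k, hk1, hk2, conn_self hts h_ k⟩
  obtain ⟨w1, w2, w3, w4⟩ :=
    loop_props hts h_ (hts.length + 1) (pvInit hts h_) hilen hisound (by omega)
  have hbase : pvBase hts h_ (pvLoop hts h_ hts.length (hts.length + 1) (pvInit hts h_)) := by
    intro k hk hgk
    exact w3 k ((init_getD hts h_ k).mpr ⟨hk, hgk⟩)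
  simp only [can_visit_all]
  rw [all_getD]
  constructor
  · intro h i hi
    exact w2 i (h i (by omega))
  · intro h i hi
    rw [w1] at hi
    exact complete_closed hts h_ _ w4 hbase i hi (h i hi)



-- ===== VERDICT (by name: the statement is the Claim_ definition above) =====
theorem can_visit_all_spec : Claim_equal_can_visit_all := by
  intro heights h_ _
  unfold Spec_can_visit_all
  have := (thmA_iff heights h_).trans (thmB_iff heights h_).symm
  exact Bool.coe_iff_coe.mp this
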